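-- pv_equiv track=rewrite | github.com/JikaiZ/knee_clf | nlp_models/text_preprocess.py | remove_signatures
-- ===== SOURCE A (Python) =====
-- def remove_signatures(input_string):
-- 	tokens = input_string.split(' ')
-- 	signature_idx = []
-- 	for idx, token in enumerate(tokens):
-- 	    if 'electronically' in token.lower():
-- 	        signature_idx.append(idx)
-- 	if len(signature_idx) != 0:
-- 	    first_signature_idx = signature_idx[0]
-- 	    new_tokens = ' '.join(tokens[:first_signature_idx])
-- 	else:
-- 	    new_tokens = ' '.join(tokens)
-- 	return new_tokens
-- ===== SOURCE B (Python) =====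
-- def remove_signatures(input_string):
-- 	pos = input_string.lower().find('electronically')
-- 	if pos == -1:
-- 		return input_string
-- 	cut = input_string.rfind(' ', 0, pos)
-- 	return '' if cut == -1 else input_string[:cut]
-- ===== Notes on version B (the rewrite author's own statement) =====
-- stated objective: simpler
-- what changed: Replaces the tokenize/enumerate/collect-indices/join pipeline with a direct case-folded substring search (str.find on the lowered string) plus one rfind for the space preceding the match and a single slice, never building the token list.
import Mathlib
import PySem

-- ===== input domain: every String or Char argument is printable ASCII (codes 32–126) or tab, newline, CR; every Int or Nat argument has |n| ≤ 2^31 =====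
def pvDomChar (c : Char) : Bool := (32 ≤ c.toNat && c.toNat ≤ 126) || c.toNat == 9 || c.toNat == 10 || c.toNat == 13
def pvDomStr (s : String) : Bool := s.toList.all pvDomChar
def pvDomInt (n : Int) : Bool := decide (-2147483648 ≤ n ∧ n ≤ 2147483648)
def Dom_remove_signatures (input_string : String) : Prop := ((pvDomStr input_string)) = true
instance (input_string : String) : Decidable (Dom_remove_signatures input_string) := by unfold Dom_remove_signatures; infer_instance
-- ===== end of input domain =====

-- B replaces A's tokenize/enumerate/collect-indices/join pipeline with one case-folded
-- substring search plus an rfind for the preceding space and a single slice (objective: simpler).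

-- ===== PORT A =====
def remove_signatures (input_string : String) : String :=
  let tokens : List String := (PySem.Str.split? input_string " ").getD []
  let signature_idx : List Int :=
    (PySem.List.enumerate tokens).foldl
      (fun acc p => if PySem.Str.isIn "electronically" (PySem.Str.lower p.2) then acc ++ [p.1] else acc) []
  if signature_idx.length ≠ 0 then
    -- signature_idx[0]: in range (the list was tested nonempty), so getD never takes its default
    let first_signature_idx := (PySem.List.pyGet? signature_idx 0).getD 0
    PySem.Str.join " " (PySem.List.slice tokens none (some first_signature_idx))
  else
    PySem.Str.join " " tokens

-- ===== PORT B =====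
def remove_signatures_alt (input_string : String) : String :=
  let pos : Int := PySem.Str.find (PySem.Str.lower input_string) "electronically"
  if pos == -1 then input_string
  else
    let cut : Int := PySem.Str.rfindFrom input_string " " 0 (some pos)
    if cut == -1 then "" else PySem.Str.slice input_string none (some cut)

-- ===== PRECONDITION & SPEC =====
def Spec_remove_signatures (input_string : String) (out : String) : Prop := out = remove_signatures_alt input_string
instance (input_string : String) (out : String) : Decidable (Spec_remove_signatures input_string out) := by unfold Spec_remove_signatures; infer_instance

-- ===== CLAIM (what is proved, stated in full; the proofs are below) =====
def Claim_equal_remove_signatures : Prop := ∀ (input_string : String), Dom_remove_signatures input_string → Spec_remove_signatures input_string (remove_signatures input_string)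

-- ===== LEMMAS AND PROOFS =====

/-- the searched pattern, as a character list -/
def esub : List Char := "electronically".toList

lemma esub_ne_nil : esub ≠ [] := by decide

lemma space_not_mem_esub : ' ' ∉ esub := by decide

/-- structural recursion computing `str.split(' ')` -/
def mySplit : List Char → List (List Char)
  | [] => [[]]
  | c :: t =>
      if c = ' ' then [] :: mySplit t
      else
        match mySplit t with
        | [] => [[c]]
        | h :: r => (c :: h) :: r

lemma mySplit_ne_nil (l : List Char) : mySplit l ≠ [] := by
  cases l with
  | nil => simp [mySplit]
  | cons c t =>
      simp only [mySplit]
      split <;> [skip; split] <;> simp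

lemma mySplit_no_space (l : List Char) : ∀ x ∈ mySplit l, ' ' ∉ x := by
  induction l with
  | nil => simp [mySplit]
  | cons c t ih =>
      simp only [mySplit]
      split
      · intro x hx
        rcases List.mem_cons.mp hx with h | h
        · simp [h]
        · exact ih x h
      · rename_i hc
        cases hms : mySplit t with
        | nil => exact absurd hms (mySplit_ne_nil t)
        | cons h r =>
            intro x hx
            rcases List.mem_cons.mp hx with h1 | h1
            · subst h1
              intro hmem
              rcases List.mem_cons.mp hmem with h2 | h2
              · exact hc h2.symm
              · exact ih h (by rw [hms]; exact List.mem_cons_self) h2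
            · exact ih x (by rw [hms]; exact List.mem_cons_of_mem _ h1)

lemma splitOn_go_eq (l : List Char) : ∀ (fuel : Nat), l.length ≤ fuel →
    ∀ (cur : List Char) (acc : List (List Char)),
    PySem.Chars.splitOn.go [' '] fuel l cur acc =
      acc.reverse ++ (cur.reverse ++ (mySplit l).headI) :: (mySplit l).tail := by
  induction l with
  | nil =>
      intro fuel _ cur acc
      cases fuel with
      | zero => rw [PySem.Chars.splitOn.go]; simp [mySplit]
      | succ f => rw [PySem.Chars.splitOn.go]; simp [mySplit]; omega
  | cons c rest ih =>
      intro fuel hfuel cur acc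
      cases fuel with
      | zero => simp at hfuel
      | succ f =>
          rw [PySem.Chars.splitOn.go]
          by_cases hc : c = ' '
          · subst hc
            have hpre : [' '].isPrefixOf (' ' :: rest) = true := by
              simp [List.isPrefixOf]
            rw [if_pos hpre]
            have hlen : rest.length ≤ f := by simpa using hfuel
            have := ih f hlen [] (cur.reverse :: acc)
            simp only [List.length_cons, List.length_nil, List.drop_succ_cons,
              List.drop_zero] at this ⊢
            rw [this]
            cases hms : mySplit rest with
            | nil => exact absurd hms (mySplit_ne_nil rest)
            | cons h r => simp [mySplit, hms]
          · have hpre : [' '].isPrefixOf (c :: rest) = false := by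
              simp [List.isPrefixOf]
              intro h; exact absurd h.symm hc
            rw [if_neg (by simp [hpre])]
            have hlen : rest.length ≤ f := by simpa using hfuel
            rw [ih f hlen (c :: cur) acc]
            cases hms : mySplit rest with
            | nil => exact absurd hms (mySplit_ne_nil rest)
            | cons h r => simp [mySplit, hms, hc]

lemma splitOn_space (l : List Char) : PySem.Chars.splitOn l [' '] = mySplit l := by
  have := splitOn_go_eq l (l.length + 1) (by omega) [] []
  rw [PySem.Chars.splitOn, this]
  cases hms : mySplit l with
  | nil => exact absurd hms (mySplit_ne_nil l)
  | cons h r => simp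

lemma join_append_cons (tws : List (List Char)) (x : List Char) (r : List (List Char))
    (h : tws ≠ []) :
    PySem.Chars.join [' '] (tws ++ x :: r) =
      PySem.Chars.join [' '] tws ++ ' ' :: PySem.Chars.join [' '] (x :: r) := by
  induction tws with
  | nil => exact absurd rfl h
  | cons a tws ih =>
      cases tws with
      | nil =>
          rw [List.cons_append, List.nil_append, PySem.Chars.join_cons_cons,
            PySem.Chars.join_singleton]
          simp
      | cons b tws' =>
          have h1 : (a :: b :: tws') ++ x :: r = a :: ((b :: tws') ++ x :: r) := rfl
          have h2 : (b :: tws') ++ x :: r = b :: (tws' ++ x :: r) := rfl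
          rw [h1, h2, PySem.Chars.join_cons_cons [' '] a b (tws' ++ x :: r), ← h2,
            ih (by simp), PySem.Chars.join_cons_cons [' '] a b tws']
          simp

lemma join_mySplit (l : List Char) : PySem.Chars.join [' '] (mySplit l) = l := by
  induction l with
  | nil => simp [mySplit, PySem.Chars.join_singleton]
  | cons c t ih =>
      simp only [mySplit]
      split
      · rename_i hc
        subst hc
        cases hms : mySplit t with
        | nil => exact absurd hms (mySplit_ne_nil t)
        | cons h r =>
            rw [hms] at ih
            rw [PySem.Chars.join_cons_cons [' '] [] h r, ih]
            simp
      · rename_i hc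
        cases hms : mySplit t with
        | nil => exact absurd hms (mySplit_ne_nil t)
        | cons h r =>
            rw [hms] at ih
            cases r with
            | nil =>
                rw [PySem.Chars.join_singleton]
                rw [PySem.Chars.join_singleton] at ih
                simp [ih]
            | cons h2 r2 =>
                rw [PySem.Chars.join_cons_cons [' '] (c :: h) h2 r2]
                rw [PySem.Chars.join_cons_cons [' '] h h2 r2] at ih
                rw [← ih]
                simp

lemma findgo_shift (sub : List Char) (l : List Char) : ∀ (k : Nat),
    PySem.Chars.find.go sub l k =
      if PySem.Chars.find l sub = -1 then -1 else (k : Int) + PySem.Chars.find l sub := by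
  induction l with
  | nil =>
      intro k
      simp only [PySem.Chars.find]
      rw [PySem.Chars.find.go.eq_1, PySem.Chars.find.go.eq_1]
      by_cases h : sub.isEmpty = true <;> simp [h]
  | cons c t ih =>
      intro k
      simp only [PySem.Chars.find]
      rw [PySem.Chars.find.go.eq_2, PySem.Chars.find.go.eq_2 sub 0]
      by_cases hp : sub.isPrefixOf (c :: t) = true
      · simp [hp]
      · simp only [hp]
        have h1 := ih (k + 1)
        have h0 := ih 1
        have hb := PySem.Chars.neg_one_le_find t sub
        simp only [PySem.Chars.find] at h1 h0 hb
        rw [h1, h0]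
        split_ifs with h <;> push_cast <;> omega

lemma find_cons (c : Char) (t : List Char) (sub : List Char) :
    PySem.Chars.find (c :: t) sub =
      if sub.isPrefixOf (c :: t) then 0
      else if PySem.Chars.find t sub = -1 then -1 else 1 + PySem.Chars.find t sub := by
  simp only [PySem.Chars.find]
  rw [PySem.Chars.find.go.eq_2]
  by_cases hp : sub.isPrefixOf (c :: t) = true
  · simp [hp]
  · simp only [hp]
    have := findgo_shift sub t 1
    simp only [PySem.Chars.find] at this
    rw [this]
    norm_num

lemma prefix_no_space (sub x y : List Char) (hsp : ' ' ∉ sub)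
    (h : sub <+: x ++ ' ' :: y) : sub <+: x := by
  by_cases hlen : sub.length ≤ x.length
  · exact List.prefix_of_prefix_length_le h (List.prefix_append x (' ' :: y)) hlen
  · exfalso
    have hx : x <+: sub :=
      List.prefix_of_prefix_length_le (List.prefix_append x (' ' :: y)) h (by omega)
    obtain ⟨z, hz⟩ := hx
    obtain ⟨r, hr⟩ := h
    rw [← hz, List.append_assoc] at hr
    have hzr : z ++ r = ' ' :: y := List.append_cancel_left hr
    cases z with
    | nil => rw [← hz] at hlen; simp at hlen
    | cons z0 zt =>
        have : z0 = ' ' := by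
          have := congrArg (List.headI) hzr
          simpa using this
        apply hsp
        rw [← hz, this]
        exact List.mem_append_right x (List.mem_cons_self)

lemma find_append_space (sub x y : List Char) (hne : sub ≠ []) (hsp : ' ' ∉ sub)
    (hx : ¬ sub <:+: x) :
    PySem.Chars.find (x ++ ' ' :: y) sub =
      if PySem.Chars.find y sub = -1 then -1
      else (x.length : Int) + 1 + PySem.Chars.find y sub := by
  induction x with
  | nil =>
      simp only [List.nil_append]
      rw [find_cons]
      have hp : sub.isPrefixOf (' ' :: y) = false := by
        rw [Bool.eq_false_iff]
        intro hp
        have := prefix_no_space sub [] y hsp (by simpa using List.isPrefixOf_iff_prefix.mp hp)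
        simp at this
        exact hne this
      simp only [hp, Bool.false_eq_true, if_false]
      split_ifs <;> simp
  | cons c x' ih =>
      have hx' : ¬ sub <:+: x' := fun h => hx (h.trans (List.suffix_cons c x').isInfix)
      rw [List.cons_append, find_cons]
      have hp : sub.isPrefixOf (c :: (x' ++ ' ' :: y)) = false := by
        rw [Bool.eq_false_iff]
        intro hp
        have hpre : sub <+: (c :: x') ++ ' ' :: y := by
          rw [List.cons_append]; exact List.isPrefixOf_iff_prefix.mp hp
        exact hx (prefix_no_space sub (c :: x') y hsp hpre).isInfix
      simp only [hp, Bool.false_eq_true, if_false]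
      rw [ih hx']
      have hby := PySem.Chars.neg_one_le_find y sub
      simp only [List.length_cons]
      split_ifs with h <;> push_cast <;> omega

lemma find_le_of_infix (sub x r : List Char) (h : sub <:+: x) :
    0 ≤ PySem.Chars.find (x ++ r) sub ∧ PySem.Chars.find (x ++ r) sub ≤ (x.length : Int) := by
  have hnn : 0 ≤ PySem.Chars.find (x ++ r) sub :=
    (PySem.Chars.find_nonneg_iff _ _).mpr (h.trans (List.prefix_append x r).isInfix)
  obtain ⟨pre, post, hx⟩ := h
  have hdrop : sub <+: List.drop pre.length (x ++ r) := by
    rw [← hx]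
    rw [List.append_assoc, List.append_assoc]
    rw [List.drop_left]
    exact ⟨post ++ r, by simp⟩
  have hspec := PySem.Chars.find_spec (s := x ++ r) (sub := sub) hnn
  have hmin : (PySem.Chars.find (x ++ r) sub).toNat ≤ pre.length := by
    by_contra hgt
    exact hspec.2 pre.length (by omega) hdrop
  have hpre_le : pre.length ≤ x.length := by
    have := congrArg List.length hx
    simp at this
    omega
  constructor
  · exact hnn
  · omega

lemma rfindgo_cons_space (t : List Char) (c : Char) : ∀ (j : Nat),
    PySem.Chars.rfind.go (c :: t) [' '] (j + 1) =
      if PySem.Chars.rfind.go t [' '] j = -1 then (if c = ' ' then 0 else -1)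
      else 1 + PySem.Chars.rfind.go t [' '] j := by
  intro j
  induction j with
  | zero =>
      conv_lhs => rw [PySem.Chars.rfind.go]
      rw [PySem.Chars.rfind.go]
      conv_rhs => rw [PySem.Chars.rfind.go]
      simp only [List.drop_succ_cons, List.drop_zero]
      by_cases hp : [' '].isPrefixOf t = true
      · simp [hp]
      · have hc : [' '].isPrefixOf (c :: t) = (' ' == c) := by
          simp [List.isPrefixOf]
        by_cases hq : c = ' '
        · subst hq; simp [hp, hc]
        · have h1 : (' ' == c) = false := beq_eq_false_iff_ne.mpr (Ne.symm hq)
          simp [hp, hc, h1, hq]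
  | succ j ihj =>
      conv_lhs => rw [PySem.Chars.rfind.go]
      conv_rhs => rw [PySem.Chars.rfind.go]
      simp only [List.drop_succ_cons]
      by_cases hp : [' '].isPrefixOf (List.drop (j + 1) t) = true
      · simp [hp]
        omega
      · simp only [hp, Bool.false_eq_true, if_false]
        exact ihj

lemma rfind_cons_space (c : Char) (t : List Char) :
    PySem.Chars.rfind (c :: t) [' '] =
      if PySem.Chars.rfind t [' '] = -1 then (if c = ' ' then 0 else -1)
      else 1 + PySem.Chars.rfind t [' '] := by
  have h : PySem.Chars.rfind (c :: t) [' '] = PySem.Chars.rfind.go (c :: t) [' '] (t.length + 1) :=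
    rfl
  rw [h, rfindgo_cons_space t c t.length]
  rfl

lemma rfind_lb_space (l : List Char) : -1 ≤ PySem.Chars.rfind l [' '] := by
  induction l with
  | nil => decide
  | cons c t ih =>
      rw [rfind_cons_space]
      split_ifs <;> omega

lemma rfind_no_space (l : List Char) (h : ' ' ∉ l) : PySem.Chars.rfind l [' '] = -1 := by
  induction l with
  | nil => decide
  | cons c t ih =>
      rw [rfind_cons_space]
      have hc : c ≠ ' ' := fun hc => h (by simp [hc])
      have ht : PySem.Chars.rfind t [' '] = -1 := ih fun hm => h (List.mem_cons_of_mem _ hm)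
      simp [ht, hc]

lemma rfind_append_space (x y : List Char) :
    PySem.Chars.rfind (x ++ ' ' :: y) [' '] =
      if PySem.Chars.rfind y [' '] = -1 then (x.length : Int)
      else (x.length : Int) + 1 + PySem.Chars.rfind y [' '] := by
  induction x with
  | nil =>
      simp only [List.nil_append]
      rw [rfind_cons_space]
      norm_num
  | cons c x' ih =>
      rw [List.cons_append, rfind_cons_space, ih]
      have hlb := rfind_lb_space y
      by_cases h : PySem.Chars.rfind y [' '] = -1
      · rw [if_pos h, if_pos h, if_neg (by omega)]
        simp only [List.length_cons]
        push_cast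
        ring
      · rw [if_neg h, if_neg h, if_neg (by omega)]
        simp only [List.length_cons]
        push_cast
        ring

lemma rfindFrom_eval (l : List Char) (pos : Int) (h0 : 0 ≤ pos) (h1 : pos ≤ (l.length : Int)) :
    PySem.Chars.rfindFrom l [' '] 0 (some pos) =
      PySem.Chars.rfind (List.take pos.toNat l) [' '] := by
  have hb := rfind_lb_space (List.take pos.toNat l)
  simp only [PySem.Chars.rfindFrom]
  norm_num
  split_ifs <;> omega

lemma slice_take {α : Type} (l : List α) (cut : Int) (h0 : 0 ≤ cut) (h1 : cut ≤ (l.length : Int)) :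
    PySem.List.slice l none (some cut) = List.take cut.toNat l := by
  simp only [PySem.List.slice, PySem.List.clampIdx]
  rw [if_neg (by omega)]
  have : min cut.toNat l.length = cut.toNat := by omega
  simp [this]

/-- indices collected by A's loop -/
def idxs (P : String → Bool) : List String → Int → List Int
  | [], _ => []
  | x :: t, off => if P x then off :: idxs P t (off + 1) else idxs P t (off + 1)

lemma foldl_idxs (P : String → Bool) : ∀ (toks : List String) (off : Int) (acc : List Int),
    (PySem.List.enumerate toks off).foldl
        (fun acc p => if P p.2 then acc ++ [p.1] else acc) acc = acc ++ idxs P toks off := by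
  intro toks
  induction toks with
  | nil => intro off acc; simp [idxs, PySem.List.enumerate]
  | cons x t ih =>
      intro off acc
      rw [PySem.List.enumerate.eq_2]
      simp only [List.foldl_cons]
      by_cases hP : P x = true
      · simp only [hP, if_true, idxs]
        rw [ih (off + 1) (acc ++ [off])]
        simp
      · simp only [hP, Bool.false_eq_true, if_false, idxs]
        rw [ih (off + 1) acc]

lemma idxs_nil_iff (P : String → Bool) : ∀ (toks : List String) (off : Int),
    idxs P toks off = [] ↔ ∀ x ∈ toks, P x = false := by
  intro toks
  induction toks with
  | nil => intro off; simp [idxs]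
  | cons x t ih =>
      intro off
      simp only [idxs]
      by_cases hP : P x = true
      · simp [hP]
      · simp only [hP, Bool.false_eq_true, if_false]
        rw [ih (off + 1)]
        simp [Bool.eq_false_iff.mpr hP]

lemma idxs_head (P : String → Bool) : ∀ (toks : List String) (off : Int),
    (∃ x ∈ toks, P x = true) →
    (idxs P toks off).head? =
      some (off + ((toks.takeWhile (fun x => !P x)).length : Int)) := by
  intro toks
  induction toks with
  | nil => intro off h; simp at h
  | cons x t ih =>
      intro off hex
      simp only [idxs]
      by_cases hP : P x = true
      · simp [hP]
      · have hex' : ∃ y ∈ t, P y = true := by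
          rcases hex with ⟨y, hy, hPy⟩
          rcases List.mem_cons.mp hy with h | h
          · subst h; exact absurd hPy hP
          · exact ⟨y, h, hPy⟩
        simp only [hP, Bool.false_eq_true, if_false]
        rw [ih (off + 1) hex']
        simp only [List.takeWhile_cons, Bool.eq_false_iff.mpr hP]
        simp
        omega

lemma main_a : ∀ ts : List (List Char),
    (∀ x ∈ ts, ¬ esub <:+: PySem.Chars.lower x) →
    PySem.Chars.find (PySem.Chars.lower (PySem.Chars.join [' '] ts)) esub = -1 := by
  intro ts
  induction ts with
  | nil =>
      intro _
      rw [PySem.Chars.join_nil]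
      decide
  | cons t0 rest ih =>
      intro hall
      cases rest with
      | nil =>
          rw [PySem.Chars.join_singleton]
          exact (PySem.Chars.find_eq_neg_one_iff _ _).mpr (hall t0 List.mem_cons_self)
      | cons r0 rest' =>
          rw [PySem.Chars.join_cons_cons]
          have hsplit : PySem.Chars.lower (t0 ++ [' '] ++ PySem.Chars.join [' '] (r0 :: rest')) =
              PySem.Chars.lower t0 ++ ' ' ::
                PySem.Chars.lower (PySem.Chars.join [' '] (r0 :: rest')) := by
            simp [PySem.Chars.lower]
            decide
          rw [hsplit]
          rw [find_append_space esub (PySem.Chars.lower t0) _ esub_ne_nil space_not_mem_esub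
            (hall t0 List.mem_cons_self)]
          rw [ih fun x hx => hall x (List.mem_cons_of_mem _ hx)]
          simp

lemma lower_split (t0 : List Char) (rest : List Char) :
    PySem.Chars.lower (t0 ++ ' ' :: rest) =
      PySem.Chars.lower t0 ++ ' ' :: PySem.Chars.lower rest := by
  simp [PySem.Chars.lower]
  decide

lemma main_b : ∀ ts : List (List Char), (∀ x ∈ ts, ' ' ∉ x) →
    (∃ x ∈ ts, esub <:+: PySem.Chars.lower x) →
    ∃ p : Nat,
      PySem.Chars.find (PySem.Chars.lower (PySem.Chars.join [' '] ts)) esub = (p : Int) ∧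
      (p : Int) ≤ ((PySem.Chars.join [' '] ts).length : Int) ∧
      PySem.Chars.rfind (List.take p (PySem.Chars.join [' '] ts)) [' '] =
        (if ts.takeWhile (fun x => !(PySem.Chars.isIn esub (PySem.Chars.lower x))) = [] then -1
         else ((PySem.Chars.join [' ']
            (ts.takeWhile (fun x => !(PySem.Chars.isIn esub (PySem.Chars.lower x))))).length : Int)) := by
  intro ts
  induction ts with
  | nil => intro _ h; simp at h
  | cons t0 rest ih =>
      intro hsp hex
      by_cases h0 : esub <:+: PySem.Chars.lower t0
      · -- the first token already contains the pattern
        have hP : (!(PySem.Chars.isIn esub (PySem.Chars.lower t0))) = false := by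
          simp [(PySem.Chars.isIn_iff_infix esub (PySem.Chars.lower t0)).mpr h0]
        have htw : (t0 :: rest).takeWhile
            (fun x => !(PySem.Chars.isIn esub (PySem.Chars.lower x))) = [] := by
          rw [List.takeWhile_cons, hP]
          simp
        rw [htw]
        cases rest with
        | nil =>
            rw [PySem.Chars.join_singleton]
            have hfi := find_le_of_infix esub (PySem.Chars.lower t0) [] h0
            rw [List.append_nil] at hfi
            refine ⟨(PySem.Chars.find (PySem.Chars.lower t0) esub).toNat, ?_, ?_, ?_⟩
            · omega
            · have : (PySem.Chars.lower t0).length = t0.length := by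
                simp [PySem.Chars.lower]
              omega
            · apply rfind_no_space
              intro hm
              exact hsp t0 List.mem_cons_self (List.take_subset _ _ hm)
        | cons r0 rest' =>
            rw [PySem.Chars.join_cons_cons]
            have hshape : t0 ++ [' '] ++ PySem.Chars.join [' '] (r0 :: rest') =
                t0 ++ ' ' :: PySem.Chars.join [' '] (r0 :: rest') := by simp
            rw [hshape, lower_split]
            have hfi := find_le_of_infix esub (PySem.Chars.lower t0)
              (' ' :: PySem.Chars.lower (PySem.Chars.join [' '] (r0 :: rest'))) h0
            have hlen : (PySem.Chars.lower t0).length = t0.length := by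
              simp [PySem.Chars.lower]
            refine ⟨(PySem.Chars.find (PySem.Chars.lower t0 ++ ' ' ::
              PySem.Chars.lower (PySem.Chars.join [' '] (r0 :: rest'))) esub).toNat, ?_, ?_, ?_⟩
            · omega
            · simp only [List.length_append, List.length_cons]
              omega
            · have htk : List.take (PySem.Chars.find (PySem.Chars.lower t0 ++ ' ' ::
                  PySem.Chars.lower (PySem.Chars.join [' '] (r0 :: rest'))) esub).toNat
                  (t0 ++ ' ' :: PySem.Chars.join [' '] (r0 :: rest')) =
                  List.take (PySem.Chars.find (PySem.Chars.lower t0 ++ ' ' ::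
                    PySem.Chars.lower (PySem.Chars.join [' '] (r0 :: rest'))) esub).toNat t0 :=
                List.take_append_of_le_length (by omega)
              rw [htk]
              apply rfind_no_space
              intro hm
              exact hsp t0 List.mem_cons_self (List.take_subset _ _ hm)
      · -- first token clean: recurse on the rest
        have hIs : PySem.Chars.isIn esub (PySem.Chars.lower t0) = false := by
          rw [Bool.eq_false_iff]
          intro hh
          exact h0 ((PySem.Chars.isIn_iff_infix _ _).mp hh)
        cases rest with
        | nil =>
            exfalso
            obtain ⟨x, hx, hinf⟩ := hex
            rcases List.mem_cons.mp hx with h | h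
            · exact h0 (h ▸ hinf)
            · simp at h
        | cons r0 rest' =>
            have hex' : ∃ x ∈ r0 :: rest', esub <:+: PySem.Chars.lower x := by
              obtain ⟨x, hx, hinf⟩ := hex
              rcases List.mem_cons.mp hx with h | h
              · exact absurd (h ▸ hinf) h0
              · exact ⟨x, h, hinf⟩
            obtain ⟨p', hfind', hle', hrf'⟩ :=
              ih (fun x hx => hsp x (List.mem_cons_of_mem _ hx)) hex'
            rw [PySem.Chars.join_cons_cons]
            have hshape : t0 ++ [' '] ++ PySem.Chars.join [' '] (r0 :: rest') =
                t0 ++ ' ' :: PySem.Chars.join [' '] (r0 :: rest') := by simp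
            rw [hshape, lower_split]
            have hlen : (PySem.Chars.lower t0).length = t0.length := by
              simp [PySem.Chars.lower]
            have hfw := find_append_space esub (PySem.Chars.lower t0)
              (PySem.Chars.lower (PySem.Chars.join [' '] (r0 :: rest'))) esub_ne_nil
              space_not_mem_esub h0
            rw [hfind'] at hfw
            rw [if_neg (by omega)] at hfw
            refine ⟨t0.length + 1 + p', ?_, ?_, ?_⟩
            · rw [hfw, hlen]; push_cast; ring
            · simp only [List.length_append, List.length_cons]
              push_cast
              omega
            · have htk : List.take (t0.length + 1 + p')
                  (t0 ++ ' ' :: PySem.Chars.join [' '] (r0 :: rest')) =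
                  t0 ++ ' ' :: List.take p' (PySem.Chars.join [' '] (r0 :: rest')) := by
                rw [List.take_append]
                rw [List.take_of_length_le (by omega)]
                have h1 : t0.length + 1 + p' - t0.length = p' + 1 := by omega
                rw [h1, List.take_succ_cons]
              have hP : (!(PySem.Chars.isIn esub (PySem.Chars.lower t0))) = true := by
                simp [hIs]
              have hTW : (t0 :: r0 :: rest').takeWhile
                  (fun x => !(PySem.Chars.isIn esub (PySem.Chars.lower x))) =
                  t0 :: (r0 :: rest').takeWhile
                    (fun x => !(PySem.Chars.isIn esub (PySem.Chars.lower x))) := by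
                rw [List.takeWhile_cons, hP]
                simp
              rw [htk, rfind_append_space, hTW, if_neg (List.cons_ne_nil t0 _), hrf']
              cases htw' : (r0 :: rest').takeWhile
                  (fun x => !(PySem.Chars.isIn esub (PySem.Chars.lower x))) with
              | nil =>
                  simp [PySem.Chars.join_singleton]
              | cons w tw'' =>
                  have hne2 : ((PySem.Chars.join [' '] (w :: tw'')).length : Int) ≠ -1 := by
                    omega
                  rw [if_neg (List.cons_ne_nil w tw''), if_neg hne2,
                    PySem.Chars.join_cons_cons]
                  simp only [List.length_append, List.length_cons, List.length_nil]
                  push_cast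
                  ring

lemma take_length_takeWhile' {α : Type} (p : α → Bool) (l : List α) :
    List.take (List.takeWhile p l).length l = List.takeWhile p l := by
  conv_lhs => rw [← List.takeWhile_append_dropWhile (p := p) (l := l)]
  rw [List.take_append_of_le_length (by simp)]
  simp

lemma str_tokens_eq (s : String) :
    (PySem.Str.split? s " ").getD [] = (mySplit s.toList).map String.ofList := by
  have h1 : (" " : String).toList = [' '] := rfl
  simp only [PySem.Str.split?, PySem.Chars.split?, h1]
  rw [splitOn_space]
  simp

lemma str_join_ofList (parts : List (List Char)) :
    PySem.Str.join " " (parts.map String.ofList) = String.ofList (PySem.Chars.join [' '] parts) := by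
  have hmap : String.toList ∘ String.ofList = id := funext fun x => String.toList_ofList
  rw [← String.toList_inj, PySem.Str.toList_join, List.map_map, hmap, List.map_id]
  exact String.toList_ofList.symm

lemma pstr_ofList (x : List Char) :
    PySem.Str.isIn "electronically" (PySem.Str.lower (String.ofList x)) =
      PySem.Chars.isIn esub (PySem.Chars.lower x) := by
  simp only [PySem.Str.isIn, PySem.Str.toList_lower, String.toList_ofList]
  rfl

/-- Bool test: some token contains the pattern (case-insensitively) -/
def hasSig (ts : List (List Char)) : Bool :=
  ts.any (fun x => PySem.Chars.isIn esub (PySem.Chars.lower x))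

lemma hasSig_iff (ts : List (List Char)) :
    hasSig ts = true ↔ ∃ x ∈ ts, esub <:+: PySem.Chars.lower x := by
  simp [hasSig, List.any_eq_true, PySem.Chars.isIn_iff_infix]

lemma pyget_head {l : List Int} : PySem.List.pyGet? l 0 = l.head? := by
  have hcast := PySem.List.pyGet?_natCast l 0
  simp only [Nat.cast_zero] at hcast
  rw [hcast, List.head?_eq_getElem?]

lemma A_eq (s : String) :
    remove_signatures s =
      if hasSig (mySplit s.toList) then
        String.ofList (PySem.Chars.join [' ']
          ((mySplit s.toList).takeWhile (fun x => !(PySem.Chars.isIn esub (PySem.Chars.lower x)))))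
      else s := by
  have htok : (PySem.Str.split? s " ").getD [] = (mySplit s.toList).map String.ofList :=
    str_tokens_eq s
  simp only [remove_signatures]
  rw [htok,
    foldl_idxs (fun tok => PySem.Str.isIn "electronically" (PySem.Str.lower tok))
      ((mySplit s.toList).map String.ofList) 0 []]
  simp only [List.nil_append]
  by_cases h : hasSig (mySplit s.toList) = true
  · obtain ⟨x, hx, hinf⟩ := (hasSig_iff _).mp h
    have hexS : ∃ tok ∈ (mySplit s.toList).map String.ofList,
        (fun tok => PySem.Str.isIn "electronically" (PySem.Str.lower tok)) tok = true := by
      refine ⟨String.ofList x, List.mem_map_of_mem hx, ?_⟩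
      simp only [pstr_ofList]
      exact (PySem.Chars.isIn_iff_infix _ _).mpr hinf
    have hhead := idxs_head (fun tok => PySem.Str.isIn "electronically" (PySem.Str.lower tok))
      ((mySplit s.toList).map String.ofList) 0 hexS
    have hne : idxs (fun tok => PySem.Str.isIn "electronically" (PySem.Str.lower tok))
        ((mySplit s.toList).map String.ofList) 0 ≠ [] := by
      intro h0
      rw [h0] at hhead
      simp at hhead
    have hlen : (idxs (fun tok => PySem.Str.isIn "electronically" (PySem.Str.lower tok))
        ((mySplit s.toList).map String.ofList) 0).length ≠ 0 := by
      simpa [List.length_eq_zero_iff] using hne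
    rw [if_pos hlen, pyget_head, hhead]
    simp only [Option.getD_some, zero_add]
    have htwmap : ((mySplit s.toList).map String.ofList).takeWhile
        (fun tok => !(PySem.Str.isIn "electronically" (PySem.Str.lower tok))) =
        ((mySplit s.toList).takeWhile
          (fun x => !(PySem.Chars.isIn esub (PySem.Chars.lower x)))).map String.ofList := by
      rw [List.takeWhile_map]
      have hfun : ((fun tok => !(PySem.Str.isIn "electronically" (PySem.Str.lower tok))) ∘
          String.ofList) = fun x => !(PySem.Chars.isIn esub (PySem.Chars.lower x)) :=
        funext fun x => by simp only [Function.comp_apply, pstr_ofList]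
      rw [hfun]
    have hsl : PySem.List.slice ((mySplit s.toList).map String.ofList) none
        (some ((((((mySplit s.toList).map String.ofList).takeWhile
          (fun tok => !(PySem.Str.isIn "electronically" (PySem.Str.lower tok)))).length : Nat)) : Int)) =
        ((mySplit s.toList).takeWhile
          (fun x => !(PySem.Chars.isIn esub (PySem.Chars.lower x)))).map String.ofList := by
      rw [slice_take _ _ (by omega) (by
        have := (List.takeWhile_prefix
          (l := (mySplit s.toList).map String.ofList)
          (p := fun tok => !(PySem.Str.isIn "electronically" (PySem.Str.lower tok)))).length_le
        omega)]
      rw [Int.toNat_natCast, take_length_takeWhile', htwmap]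
    rw [hsl, str_join_ofList, if_pos h]
  · have hall : ∀ tok ∈ (mySplit s.toList).map String.ofList,
        (fun tok => PySem.Str.isIn "electronically" (PySem.Str.lower tok)) tok = false := by
      intro tok htok'
      obtain ⟨x, hx, rfl⟩ := List.mem_map.mp htok'
      simp only [pstr_ofList, Bool.eq_false_iff]
      intro hc
      exact h ((hasSig_iff _).mpr ⟨x, hx, (PySem.Chars.isIn_iff_infix _ _).mp hc⟩)
    have hnil := (idxs_nil_iff (fun tok => PySem.Str.isIn "electronically" (PySem.Str.lower tok))
      ((mySplit s.toList).map String.ofList) 0).mpr hall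
    rw [hnil, if_neg (by simp), if_neg h, str_join_ofList]
    rw [← String.toList_inj, String.toList_ofList, join_mySplit]

lemma B_eq (s : String) :
    remove_signatures_alt s =
      if hasSig (mySplit s.toList) then
        String.ofList (PySem.Chars.join [' ']
          ((mySplit s.toList).takeWhile (fun x => !(PySem.Chars.isIn esub (PySem.Chars.lower x)))))
      else s := by
  have hjoin := join_mySplit s.toList
  simp only [remove_signatures_alt]
  by_cases h : hasSig (mySplit s.toList) = true
  · obtain ⟨p, hfind, hle, hrf⟩ :=
      main_b (mySplit s.toList) (mySplit_no_space s.toList) ((hasSig_iff _).mp h)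
    rw [hjoin] at hfind hle hrf
    have hpos : PySem.Str.find (PySem.Str.lower s) "electronically" = (p : Int) := by
      rw [PySem.Str.find_eq, PySem.Str.toList_lower]
      exact hfind
    rw [hpos]
    have hbeq : ((p : Int) == -1) = false := beq_eq_false_iff_ne.mpr (by omega)
    rw [hbeq]
    simp only [Bool.false_eq_true, if_false]
    have hspc : (" " : String).toList = [' '] := rfl
    have hcut : PySem.Str.rfindFrom s " " 0 (some (p : Int)) =
        PySem.Chars.rfind (List.take p s.toList) [' '] := by
      rw [PySem.Str.rfindFrom_eq, hspc, rfindFrom_eval s.toList (p : Int) (by omega) hle,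
        Int.toNat_natCast]
    rw [hcut, hrf, if_pos h]
    cases htw : (mySplit s.toList).takeWhile
        (fun x => !(PySem.Chars.isIn esub (PySem.Chars.lower x))) with
    | nil => rfl
    | cons w tw'' =>
        rw [if_neg (List.cons_ne_nil w tw'')]
        have hbeq2 : (((PySem.Chars.join [' '] (w :: tw'')).length : Int) == -1) = false :=
          beq_eq_false_iff_ne.mpr (by omega)
        rw [hbeq2]
        simp only [Bool.false_eq_true, if_false]
        -- decompose the string after the kept tokens
        have hdw : (mySplit s.toList).dropWhile
            (fun x => !(PySem.Chars.isIn esub (PySem.Chars.lower x))) ≠ [] := by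
          intro hd
          obtain ⟨x, hx, hinf⟩ := (hasSig_iff _).mp h
          have hx' : x ∈ (mySplit s.toList).takeWhile
              (fun x => !(PySem.Chars.isIn esub (PySem.Chars.lower x))) := by
            rw [← List.takeWhile_append_dropWhile
              (p := fun x => !(PySem.Chars.isIn esub (PySem.Chars.lower x)))
              (l := mySplit s.toList)] at hx
            rcases List.mem_append.mp hx with h1 | h1
            · exact h1
            · rw [hd] at h1; simp at h1
          have := List.mem_takeWhile_imp hx'
          rw [(PySem.Chars.isIn_iff_infix _ _).mpr hinf] at this
          simp at this
        cases hdrop : (mySplit s.toList).dropWhile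
            (fun x => !(PySem.Chars.isIn esub (PySem.Chars.lower x))) with
        | nil => exact absurd hdrop hdw
        | cons d dr =>
            have hts : mySplit s.toList = (w :: tw'') ++ d :: dr := by
              rw [← htw, ← hdrop, List.takeWhile_append_dropWhile]
            have ht' : s.toList = PySem.Chars.join [' '] (w :: tw'') ++ ' ' ::
                PySem.Chars.join [' '] (d :: dr) := by
              rw [← hjoin, hts, join_append_cons _ _ _ (List.cons_ne_nil w tw'')]
            have hlen2 : ((PySem.Chars.join [' '] (w :: tw'')).length : Int) ≤
                (s.toList.length : Int) := by
              rw [ht']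
              simp only [List.length_append, List.length_cons]
              push_cast
              omega
            rw [← String.toList_inj, PySem.Str.toList_slice, PySem.Chars.slice,
              slice_take _ _ (by omega) hlen2, Int.toNat_natCast, String.toList_ofList]
            conv_lhs => rw [ht']
            exact List.take_left
  · have hall : ∀ x ∈ mySplit s.toList, ¬ esub <:+: PySem.Chars.lower x := by
      intro x hx hinf
      exact h ((hasSig_iff _).mpr ⟨x, hx, hinf⟩)
    have hfz := main_a (mySplit s.toList) hall
    rw [hjoin] at hfz
    have hpos : PySem.Str.find (PySem.Str.lower s) "electronically" = -1 := by
      rw [PySem.Str.find_eq, PySem.Str.toList_lower]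
      exact hfz
    rw [hpos]
    have : ((-1 : Int) == -1) = true := rfl
    rw [this, if_pos rfl, if_neg h]

-- ===== VERDICT (by name: the statement is the Claim_ definition above) =====
theorem remove_signatures_spec : Claim_equal_remove_signatures := by
  intro s _
  unfold Spec_remove_signatures
  rw [A_eq, B_eq]
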